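-- pv_equiv track=rewrite | github.com/yungommi/algorithm | programmers/level2/20231114/귤고르기.py | solution
-- ===== SOURCE A (Python) =====
-- def solution(k, tangerine):
--     total = len(tangerine)
--     d = {}
--     for t in tangerine:
--         if t in d:
--             d[t]+= 1
--         else:
--             d[t] = 1
--     sort_ = sorted(d.items(), key=lambda x:x[1], reverse=True)
--     s = len(sort_)
--     while True:
--         tmp = sort_.pop()
--         total -= tmp[1]
--         s -= 1
--         if total == k:
--             return s
--         elif total < k :
--             return s+1
-- ===== SOURCE B (Python) =====
-- def solution(k, tangerine):
--     # Counting sort on frequencies: no comparison sort.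
--     counts = {}
--     for t in tangerine:
--         counts[t] = counts.get(t, 0) + 1
--     n = len(tangerine)
--     bucket = [0] * (n + 1)          # bucket[c] = number of distinct sizes occurring exactly c times
--     for c in counts.values():
--         bucket[c] += 1
--     kinds = 0
--     remaining = k
--     for c in range(n, 0, -1):       # walk frequencies from largest to smallest
--         for _ in range(bucket[c]):
--             if remaining <= 0:
--                 return kinds
--             kinds += 1
--             remaining -= c
--     return kinds
-- ===== Notes on version B (the rewrite author's own statement) =====
-- stated objective: alternative
-- what changed: A sorts the (size,count) dict items with a comparison sort and pops the smallest-count pairs one by one; B never sorts: it counting-sorts the frequencies into a bucket array indexed by count and accumulates groups from the largest frequency downward until k tangerines are collected.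
import Mathlib
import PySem

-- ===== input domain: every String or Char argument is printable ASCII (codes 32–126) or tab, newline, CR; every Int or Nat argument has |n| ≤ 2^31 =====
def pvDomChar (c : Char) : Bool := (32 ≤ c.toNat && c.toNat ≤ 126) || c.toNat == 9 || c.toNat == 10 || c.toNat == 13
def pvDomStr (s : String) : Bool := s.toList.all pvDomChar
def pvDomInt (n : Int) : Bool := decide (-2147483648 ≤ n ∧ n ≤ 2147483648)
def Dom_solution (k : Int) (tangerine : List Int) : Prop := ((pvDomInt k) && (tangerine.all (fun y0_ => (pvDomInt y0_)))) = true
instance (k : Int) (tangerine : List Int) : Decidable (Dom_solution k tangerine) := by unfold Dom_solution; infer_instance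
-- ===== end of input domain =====

-- B replaces A's comparison sort of (size, count) pairs by a counting-sort bucket array over
-- frequencies scanned from largest to smallest (objective: alternative algorithm, no sort).

-- ===== PORT A =====
-- the while-True loop: 'tmp = sort_.pop()' is getLast/dropLast; on the empty list Python raises
-- IndexError (excluded by Pre_solution), the port returns 0 there.
def solutionLoop (k : Int) (l : List (Int × Int)) (total s : Int) : Int :=
  if hl : l = [] then 0
  else
    let tmp := l.getLast hl
    let total' := total - tmp.2
    let s' := s - 1
    if total' = k then s'
    else if total' < k then s' + 1
    else solutionLoop k l.dropLast total' s'
termination_by l.length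
decreasing_by
  have := List.length_pos_of_ne_nil hl
  simp [List.length_dropLast]
  omega

def solution (k : Int) (tangerine : List Int) : Int :=
  let total := PySem.List.len tangerine
  let d := tangerine.foldl
    (fun d t => if d.contains t then d.insert t (d.getD t 0 + 1) else d.insert t 1)
    PySem.Dict.empty
  let sort_ := PySem.List.sorted d.items (fun x => x.2) true
  let s := PySem.List.len sort_
  solutionLoop k sort_ total s

-- ===== PORT B =====
-- inner 'for _ in range(bucket[c])' with the early 'return kinds': once remaining ≤ 0 every later
-- step is a no-op, so the final first component equals the returned kinds.
def innerLoop (c : Int) : Nat → Int × Int → Int × Int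
  | 0, st => st
  | m + 1, (kinds, remaining) =>
      if remaining ≤ 0 then (kinds, remaining)
      else innerLoop c m (kinds + 1, remaining - c)

def solution_alt (k : Int) (tangerine : List Int) : Int :=
  let counts := tangerine.foldl (fun d t => d.insert t (d.getD t 0 + 1)) PySem.Dict.empty
  let n := PySem.List.len tangerine
  let bucket := counts.values.foldl
    (fun b c => PySem.List.pySetD b c (PySem.List.pyGetD b c 0 + 1))
    (List.replicate (n.toNat + 1) (0 : Int))
  let st := (PySem.List.pyRange n 0 (-1)).foldl
    (fun st c => innerLoop c (PySem.List.pyGetD bucket c 0).toNat st) ((0 : Int), k)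
  st.1

-- ===== PRECONDITION & SPEC =====
-- the Python A pops from an empty list (IndexError) exactly when tangerine is empty or k < 0
def Pre_solution (k : Int) (tangerine : List Int) : Prop := tangerine ≠ [] ∧ 0 ≤ k
instance (k : Int) (tangerine : List Int) : Decidable (Pre_solution k tangerine) := by
  unfold Pre_solution; infer_instance
def pvWitness_solution : Int × List Int := (2, [1, 1, 2])

def Spec_solution (k : Int) (tangerine : List Int) (out : Int) : Prop := out = solution_alt k tangerine
instance (k : Int) (tangerine : List Int) (out : Int) : Decidable (Spec_solution k tangerine out) := by unfold Spec_solution; infer_instance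

-- ===== CLAIM (what is proved, stated in full; the proofs are below) =====
def Claim_equal_solution : Prop := ∀ (k : Int) (tangerine : List Int), Dom_solution k tangerine → Pre_solution k tangerine → Spec_solution k tangerine (solution k tangerine)

-- ===== LEMMAS AND PROOFS =====

-- greedy consumption: how many items of ds are taken, front to back, until remaining ≤ 0
def consumed : List Int → Int → Int
  | [], _ => 0
  | c :: rest, r => if r ≤ 0 then 0 else 1 + consumed rest (r - c)

theorem consumed_nonpos (xs : List Int) (r : Int) (h : r ≤ 0) : consumed xs r = 0 := by
  cases xs <;> simp [consumed, h]

theorem consumed_append (xs : List Int) (h : ∀ x ∈ xs, 0 ≤ x) (ys : List Int) (r : Int) :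
    consumed (xs ++ ys) r = consumed xs r + consumed ys (r - xs.sum) := by
  induction xs generalizing r with
  | nil => simp [consumed]
  | cons c rest ih =>
    have hsum : 0 ≤ rest.sum :=
      List.sum_nonneg (fun x hx => h x (List.mem_cons_of_mem _ hx))
    have hc : 0 ≤ c := h c List.mem_cons_self
    by_cases hr : r ≤ 0
    · rw [consumed_nonpos _ _ hr, consumed_nonpos _ _ hr,
        consumed_nonpos ys _ (by simp only [List.sum_cons]; omega)]
      simp
    · simp only [List.cons_append, consumed, if_neg hr,
        ih (fun x hx => h x (List.mem_cons_of_mem _ hx)), List.sum_cons]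
      ring_nf

theorem consumed_full (xs : List Int) (h : ∀ x ∈ xs, 1 ≤ x) (r : Int) (hr : xs.sum ≤ r) :
    consumed xs r = (xs.length : Int) := by
  induction xs generalizing r with
  | nil => simp [consumed]
  | cons c rest ih =>
    have hsum : 0 ≤ rest.sum :=
      List.sum_nonneg (fun x hx => le_trans (by omega) (h x (List.mem_cons_of_mem _ hx)))
    have hc : 1 ≤ c := h c List.mem_cons_self
    have : ¬ r ≤ 0 := by simp only [List.sum_cons] at hr; omega
    simp only [consumed, if_neg this,
      ih (fun x hx => h x (List.mem_cons_of_mem _ hx)) (r - c)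
        (by simp only [List.sum_cons] at hr; omega),
      List.length_cons]
    push_cast; ring

-- A's pop loop with the pair/state bookkeeping stripped: it processes the counts in
-- ascending (pop) order, and total is invariantly the sum of the not-yet-popped counts
def popPhase (k : Int) : List Int → Int → Int
  | [], _ => 0
  | c :: rest, total =>
    if total - c = k then (rest.length : Int)
    else if total - c < k then (rest.length : Int) + 1
    else popPhase k rest (total - c)

theorem solutionLoop_eq (k : Int) (l : List (Int × Int)) :
    ∀ total : Int, solutionLoop k l total (l.length : Int)
      = popPhase k (l.reverse.map (·.2)) total := by
  induction l using List.reverseRecOn with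
  | nil => intro total; simp [solutionLoop, popPhase]
  | append_singleton xs x ih =>
    intro total
    rw [solutionLoop, dif_neg (by simp : xs ++ [x] ≠ [])]
    simp only [List.getLast_concat, List.dropLast_concat, List.reverse_append,
      List.reverse_cons, List.reverse_nil, List.nil_append, List.cons_append,
      List.map_cons, popPhase, List.length_append, List.length_cons, List.length_nil]
    have hlen : ((xs.length + (0 + 1) : Nat) : Int) - 1 = (xs.length : Int) := by
      push_cast; ring
    rw [hlen]
    split_ifs with h1 h2
    · simp
    · simp
    · rw [ih]

theorem popPhase_eq_consumed (k : Int) (asc : List Int) (h : ∀ x ∈ asc, 1 ≤ x) :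
    popPhase k asc asc.sum = consumed asc.reverse k := by
  induction asc with
  | nil => simp [popPhase, consumed]
  | cons c rest ih =>
    have hrest : ∀ x ∈ rest, 1 ≤ x := fun x hx => h x (List.mem_cons_of_mem _ hx)
    have hnn : ∀ x ∈ rest.reverse, 0 ≤ x := by
      intro x hx; exact le_trans (by omega) (hrest x (List.mem_reverse.mp hx))
    have happ : consumed ((c :: rest).reverse) k
        = consumed rest.reverse k + consumed [c] (k - rest.sum) := by
      rw [List.reverse_cons, consumed_append rest.reverse hnn [c] k,
        List.sum_reverse]
    have hsum : (c :: rest).sum - c = rest.sum := by rw [List.sum_cons]; ring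
    rw [happ]
    show popPhase k (c :: rest) (c :: rest).sum = _
    rw [popPhase.eq_def]
    simp only [hsum]
    by_cases h1 : rest.sum = k
    · rw [if_pos h1, consumed_full rest.reverse
        (fun x hx => hrest x (List.mem_reverse.mp hx)) k (by rw [List.sum_reverse]; omega),
        consumed_nonpos [c] _ (by omega)]
      simp
    · rw [if_neg h1]
      by_cases h2 : rest.sum < k
      · rw [if_pos h2, consumed_full rest.reverse
          (fun x hx => hrest x (List.mem_reverse.mp hx)) k (by rw [List.sum_reverse]; omega)]
        have : consumed [c] (k - rest.sum) = 1 := by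
          simp [consumed, show ¬ (k - rest.sum ≤ 0) by omega]
        rw [this]; simp
      · rw [if_neg h2, consumed_nonpos [c] _ (by omega), add_zero, ← ih hrest]

-- ===== B-side lemmas =====

theorem foldl_stall (ds : List Int) :
    ∀ st : Int × Int, st.2 ≤ 0 →
      ds.foldl (fun st c => if st.2 ≤ 0 then st else (st.1 + 1, st.2 - c)) st = st := by
  induction ds with
  | nil => intro st _; rfl
  | cons c rest ih => intro st h; simp only [List.foldl_cons, if_pos h]; exact ih st h

theorem innerLoop_eq (c : Int) (m : Nat) :
    ∀ st : Int × Int, innerLoop c m st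
      = (List.replicate m c).foldl
          (fun st c => if st.2 ≤ 0 then st else (st.1 + 1, st.2 - c)) st := by
  induction m with
  | zero => intro st; simp [innerLoop]
  | succ n ih =>
    intro ⟨kinds, remaining⟩
    rw [List.replicate_succ]
    by_cases hr : remaining ≤ 0
    · simp only [innerLoop, if_pos hr, List.foldl_cons]
      exact (foldl_stall (List.replicate n c) (kinds, remaining) hr).symm
    · simp [innerLoop, hr, ih]

theorem consumed_fst (ds : List Int) :
    ∀ (K r : Int),
      (ds.foldl (fun st c => if st.2 ≤ 0 then st else (st.1 + 1, st.2 - c)) (K, r)).1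
        = K + consumed ds r := by
  induction ds with
  | nil => intro K r; simp [consumed]
  | cons c rest ih =>
    intro K r
    by_cases hr : r ≤ 0
    · simp [hr, consumed, ih, consumed_nonpos rest r hr]
    · simp [hr, consumed, ih (K + 1) (r - c)]; ring

theorem bucket_step (b : List Int) (c : Int) (hc : 0 ≤ c) :
    PySem.List.pySetD b c (PySem.List.pyGetD b c 0 + 1)
      = b.set c.toNat (b.getD c.toNat 0 + 1) := by
  rw [PySem.List.pySetD_of_nonneg _ _ hc]
  congr 1
  conv_lhs => rw [show c = ((c.toNat : Nat) : Int) from (Int.toNat_of_nonneg hc).symm]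
  rw [PySem.List.pyGetD_natCast]

theorem getD_set_eq (b : List Int) (m j : Nat) (a : Int) (hm : m < b.length) :
    (b.set m a).getD j 0 = if m = j then a else b.getD j 0 := by
  simp only [List.getD, List.getElem?_set, if_pos hm]
  split_ifs <;> simp_all

theorem bucket_getD (vs : List Int) :
    ∀ (b : List Int), (∀ v ∈ vs, 0 ≤ v ∧ v.toNat < b.length) → ∀ j : Nat,
      (vs.foldl (fun b c => PySem.List.pySetD b c (PySem.List.pyGetD b c 0 + 1)) b).getD j 0
        = b.getD j 0 + (vs.count (j : Int) : Int) := by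
  induction vs with
  | nil => intro b _ j; simp
  | cons v rest ih =>
    intro b hb j
    have hv := hb v List.mem_cons_self
    have hstep := bucket_step b v hv.1
    rw [List.foldl_cons, hstep]
    have hlen : (b.set v.toNat (b.getD v.toNat 0 + 1)).length = b.length := by simp
    rw [ih _ (fun x hx => by rw [hlen]; exact hb x (List.mem_cons_of_mem _ hx)) j]
    rw [getD_set_eq b v.toNat j _ hv.2]
    rw [List.count_cons]
    by_cases hvj : v.toNat = j
    · have : (v == (j : Int)) = true := by
        simp only [beq_iff_eq]; omega
      rw [if_pos hvj, this, ← hvj]; simp; ring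
    · have : (v == (j : Int)) = false := by
        simp only [beq_eq_false_iff_ne, ne_eq]
        intro hcon; apply hvj; omega
      rw [if_neg hvj, this]; push_cast; ring

-- counting sort emits each member the right number of times
theorem flatMap_replicate_perm (l : List Int) (hnd : l.Nodup) :
    ∀ vs : List Int, (∀ v ∈ vs, v ∈ l) →
      (l.flatMap (fun c => List.replicate (vs.count c) c)).Perm vs := by
  induction l with
  | nil =>
    intro vs hvs
    have : vs = [] := by
      cases vs with
      | nil => rfl
      | cons a t => exact absurd (hvs a List.mem_cons_self) (List.not_mem_nil)
    simp [this]
  | cons c l' ih =>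
    intro vs hvs
    have hnd' : l'.Nodup := (List.nodup_cons.mp hnd).2
    have hcl' : c ∉ l' := (List.nodup_cons.mp hnd).1
    rw [List.flatMap_cons]
    have hcongr : l'.flatMap (fun c' => List.replicate (vs.count c') c')
        = l'.flatMap (fun c' => List.replicate ((vs.filter (fun x => !(x == c))).count c') c') := by
      apply List.flatMap_congr    -- congruence on members
      intro c' hc'
      have : (vs.filter (fun x => !(x == c))).count c' = vs.count c' := by
        apply List.count_filter
        simp only [beq_eq_false_iff_ne, ne_eq, Bool.not_eq_eq_eq_not, Bool.not_true,
          beq_eq_false_iff_ne]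
        intro hcc; exact hcl' (hcc ▸ hc')
      rw [this]
    rw [hcongr]
    have hperm' := ih hnd' (vs.filter (fun x => !(x == c)))
      (fun v hv => by
        have hm := List.mem_of_mem_filter hv
        have hne : ¬ (v == c) = true := by
          have := List.of_mem_filter hv; simpa using this
        rcases List.mem_cons.mp (hvs v hm) with h | h
        · exact absurd (by simp [h]) hne
        · exact h)
    have hrep : List.replicate (vs.count c) c = vs.filter (fun x => x == c) := by
      rw [List.filter_beq, List.count]
    have h1 : (List.replicate (vs.count c) c
        ++ l'.flatMap (fun c' => List.replicate ((vs.filter (fun x => !(x == c))).count c') c')).Perm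
        (vs.filter (fun x => x == c) ++ vs.filter (fun x => !(x == c))) := by
      rw [hrep]; exact List.Perm.append_left _ hperm'
    exact h1.trans (List.filter_append_perm _ vs)

theorem flatMap_replicate_pairwise (l : List Int) (m : Int → Nat)
    (hl : l.Pairwise (fun a b => b ≤ a)) :
    (l.flatMap (fun c => List.replicate (m c) c)).Pairwise (fun a b => b ≤ a) := by
  induction l with
  | nil => simp
  | cons c l' ih =>
    rw [List.flatMap_cons, List.pairwise_append]
    rcases List.pairwise_cons.mp hl with ⟨hhead, htail⟩
    refine ⟨List.pairwise_replicate.mpr (Or.inr le_rfl), ih htail, ?_⟩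
    intro x hx y hy
    rcases List.eq_of_mem_replicate hx with rfl
    rcases List.mem_flatMap.mp hy with ⟨c', hc', hy'⟩
    rcases List.eq_of_mem_replicate hy' with rfl
    exact hhead _ hc'

-- ===== assembly =====

-- the multiset of group counts, A's view (sorted descending) and B's view (counting sort)
def countsOf (t : List Int) : List Int := (PySem.Dict.counter t).values

def csA (t : List Int) : List Int :=
  (PySem.List.sorted (PySem.Dict.counter t).items (fun x => x.2) true).map (·.2)

def dsB (t : List Int) : List Int :=
  (PySem.List.pyRange (t.length : Int) 0 (-1)).flatMap
    (fun c => List.replicate ((countsOf t).count c) c)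

theorem countsOf_eq (t : List Int) :
    countsOf t = (PySem.Set.ofList t).map (fun x => ((t.count x : Nat) : Int)) := by
  simp [countsOf, PySem.Dict.values, PySem.Dict.items_counter, List.map_map]

theorem countsOf_bounds (t : List Int) :
    ∀ v ∈ countsOf t, 1 ≤ v ∧ v ≤ (t.length : Int) := by
  rw [countsOf_eq]
  intro v hv
  rcases List.mem_map.mp hv with ⟨x, hx, rfl⟩
  have hmem : x ∈ t := (PySem.Set.mem_ofList t x).mp hx
  have h1 : 0 < t.count x := List.count_pos_iff.mpr hmem
  have h2 : t.count x ≤ t.length := List.count_le_length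
  refine ⟨by exact_mod_cast h1, by exact_mod_cast h2⟩

theorem countsOf_sum (t : List Int) : (countsOf t).sum = (t.length : Int) := by
  rw [countsOf_eq]
  have hperm : (PySem.Set.ofList t).Perm t.dedup :=
    (List.perm_ext_iff_of_nodup (PySem.Set.nodup_ofList t) t.nodup_dedup).mpr
      (fun a => by rw [PySem.Set.mem_ofList, List.mem_dedup])
  have := (hperm.map (fun x => ((t.count x : Nat) : Int))).sum_eq
  rw [this]
  have hcast : (t.dedup.map (fun x => ((t.count x : Nat) : Int))).sum
      = (((t.dedup.map (fun x => t.count x)).sum : Nat) : Int) := by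
    rw [Nat.cast_list_sum, List.map_map]; rfl
  rw [hcast, List.sum_map_count_dedup_eq_length]

theorem dictA_eq (t : List Int) :
    t.foldl (fun d x => if d.contains x then d.insert x (d.getD x 0 + 1) else d.insert x 1)
      PySem.Dict.empty = PySem.Dict.counter t := by
  rw [← PySem.Dict.foldl_insert_getD_add_one_eq_counter]
  apply PySem.List.foldl_congr_mem
  intro d x _
  by_cases hc : d.contains x = true
  · simp [hc]
  · have h0 := PySem.Dict.getD_of_not_contains d (0 : Int)
      (by simpa using hc)
    simp [hc, h0]

theorem csA_perm (t : List Int) : (csA t).Perm (countsOf t) := by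
  have := (PySem.List.sorted_perm (PySem.Dict.counter t).items (fun x => x.2) true).map (·.2)
  simpa [csA, countsOf, PySem.Dict.values] using this

theorem csA_pairwise (t : List Int) : (csA t).Pairwise (fun a b => b ≤ a) := by
  have := PySem.List.sorted_pairwise_rev (PySem.Dict.counter t).items (fun x => x.2)
  rw [csA, List.pairwise_map]
  exact this

theorem dsB_perm (t : List Int) : (dsB t).Perm (countsOf t) := by
  apply flatMap_replicate_perm
  · rw [PySem.List.pyRange_neg_one_eq_reverse, List.nodup_reverse]
    exact PySem.List.nodup_pyRange_one _ _
  · intro v hv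
    have := countsOf_bounds t v hv
    rw [PySem.List.mem_pyRange_neg_one]
    omega

theorem dsB_pairwise (t : List Int) : (dsB t).Pairwise (fun a b => b ≤ a) := by
  apply flatMap_replicate_pairwise
  rw [PySem.List.pyRange_neg_one_eq_reverse, List.pairwise_reverse]
  exact (PySem.List.pairwise_lt_pyRange_one _ _).imp (fun h => le_of_lt h)

theorem csA_eq_dsB (t : List Int) : csA t = dsB t := by
  exact List.Perm.eq_of_pairwise
    (fun a b _ _ h1 h2 => le_antisymm h2 h1)
    (csA_pairwise t) (dsB_pairwise t)
    ((csA_perm t).trans (dsB_perm t).symm)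

theorem solutionA_eq (k : Int) (t : List Int) :
    solution k t = consumed (csA t) k := by
  unfold solution
  simp only [PySem.List.len_eq, dictA_eq]
  rw [solutionLoop_eq]
  have h1 : ((PySem.List.sorted (PySem.Dict.counter t).items (fun x => x.2) true).reverse.map
      (·.2)) = (csA t).reverse := by
    rw [csA, List.map_reverse]
  rw [h1]
  have hsum : (csA t).reverse.sum = (t.length : Int) := by
    rw [List.sum_reverse, (csA_perm t).sum_eq, countsOf_sum]
  rw [← hsum, popPhase_eq_consumed k _ (fun x hx =>
    (countsOf_bounds t x ((csA_perm t).mem_iff.mp (List.mem_reverse.mp hx))).1),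
    List.reverse_reverse]

theorem solutionB_eq (k : Int) (t : List Int) :
    solution_alt k t = consumed (dsB t) k := by
  unfold solution_alt
  simp only [PySem.List.len_eq, PySem.Dict.foldl_insert_getD_add_one_eq_counter,
    Int.toNat_natCast]
  have hbody : ∀ (st : Int × Int), ∀ c ∈ PySem.List.pyRange (t.length : Int) 0 (-1),
      innerLoop c (PySem.List.pyGetD
        ((PySem.Dict.counter t).values.foldl
          (fun b c => PySem.List.pySetD b c (PySem.List.pyGetD b c 0 + 1))
          (List.replicate (t.length + 1) (0 : Int))) c 0).toNat st
      = (List.replicate ((countsOf t).count c) c).foldl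
          (fun st c => if st.2 ≤ 0 then st else (st.1 + 1, st.2 - c)) st := by
    intro st c hc
    rw [PySem.List.mem_pyRange_neg_one] at hc
    have hcnn : 0 ≤ c := by omega
    have hget : PySem.List.pyGetD
        ((PySem.Dict.counter t).values.foldl
          (fun b c => PySem.List.pySetD b c (PySem.List.pyGetD b c 0 + 1))
          (List.replicate (t.length + 1) (0 : Int))) c 0
        = ((countsOf t).count c : Int) := by
      conv_lhs => rw [show c = ((c.toNat : Nat) : Int) from (Int.toNat_of_nonneg hcnn).symm]
      rw [PySem.List.pyGetD_natCast,
        bucket_getD (PySem.Dict.counter t).values (List.replicate (t.length + 1) (0 : Int))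
          (fun v hv => by
            have := countsOf_bounds t v hv
            simp only [List.length_replicate]
            omega) c.toNat]
      have hrep : (List.replicate (t.length + 1) (0 : Int)).getD c.toNat 0 = 0 := by
        simp [List.getD, List.getElem?_replicate]
        split_ifs <;> simp
      rw [hrep, Int.toNat_of_nonneg hcnn]
      simp [countsOf]
    rw [hget]
    have : (((countsOf t).count c : Int)).toNat = (countsOf t).count c := by
      exact_mod_cast Int.toNat_natCast _
    rw [this, innerLoop_eq]
  rw [PySem.List.foldl_congr_mem _ _
    (fun st c => (List.replicate ((countsOf t).count c) c).foldl
      (fun st c => if st.2 ≤ 0 then st else (st.1 + 1, st.2 - c)) st) _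
    (fun st c hc => hbody st c hc)]
  rw [← List.foldl_flatMap]
  rw [show ((PySem.List.pyRange (t.length : Int) 0 (-1)).flatMap
      (fun c => List.replicate ((countsOf t).count c) c)) = dsB t from rfl]
  rw [consumed_fst (dsB t) 0 k, zero_add]

-- ===== VERDICT =====
theorem solution_spec : Claim_equal_solution := by
  intro k tangerine _ _
  unfold Spec_solution
  rw [solutionA_eq, solutionB_eq, csA_eq_dsB]
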